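-- pv_equiv track=rewrite | github.com/reducedmatrice/BadmintonCoachAgent | backend/packages/harness/deerflow/evaluation/coach_eval.py | _collect_dimension_names
-- ===== SOURCE A (Python) =====
-- from typing import Any
--
-- def _collect_dimension_names(results: list[dict[str, Any]]) -> tuple[str, ...]:
--     ordered = (
--         "route",
--         "structure",
--         "actionability",
--         "grounding",
--         "safety",
--         "mixed_intent_ordering",
--         "persona_consistency",
--         "writeback_correctness",
--     )
--     return tuple(name for name in ordered if any(name in result["scores"] for result in results))
-- ===== SOURCE B (Python) =====
-- def _collect_dimension_names(results):
--     ordered = (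
--         "route",
--         "structure",
--         "actionability",
--         "grounding",
--         "safety",
--         "mixed_intent_ordering",
--         "persona_consistency",
--         "writeback_correctness",
--     )
--     present = set()
--     for result in results:
--         if all(name in present for name in ordered):
--             break
--         present.update(result["scores"])
--     return tuple(name for name in ordered if name in present)
-- ===== Notes on version B (the rewrite author's own statement) =====
-- stated objective: simpler
-- what changed: B makes a single accumulating pass over results collecting the set of seen score keys (breaking early once all eight dimensions are covered), instead of rescanning the whole results list once per dimension name.
import Mathlib
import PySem

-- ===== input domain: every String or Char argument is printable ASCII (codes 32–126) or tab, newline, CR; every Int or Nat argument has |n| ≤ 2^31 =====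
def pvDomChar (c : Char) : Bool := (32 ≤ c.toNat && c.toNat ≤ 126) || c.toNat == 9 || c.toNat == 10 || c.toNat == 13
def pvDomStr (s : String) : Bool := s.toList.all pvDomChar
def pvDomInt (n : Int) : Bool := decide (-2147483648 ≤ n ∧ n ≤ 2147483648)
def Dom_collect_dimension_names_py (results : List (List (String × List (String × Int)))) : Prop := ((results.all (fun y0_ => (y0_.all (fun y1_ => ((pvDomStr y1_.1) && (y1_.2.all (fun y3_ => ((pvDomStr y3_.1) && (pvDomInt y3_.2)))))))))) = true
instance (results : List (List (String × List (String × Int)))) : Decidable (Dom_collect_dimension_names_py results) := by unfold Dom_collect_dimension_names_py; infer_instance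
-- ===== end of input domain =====

-- B replaces A's per-name rescans of `results` with a single accumulating pass over `results`
-- (a set of seen score keys, breaking early once all eight dimensions are covered).


-- the fixed tuple `ordered` (shared data, used verbatim by both Pythons)
def pvOrdered : List String :=
  ["route", "structure", "actionability", "grounding", "safety",
   "mixed_intent_ordering", "persona_consistency", "writeback_correctness"]

-- ===== PORT A =====
-- A: tuple(name for name in ordered if any(name in result["scores"] for result in results)).
-- `result["scores"]` raises KeyError when the key is missing: ported as getD "scores" [] and
-- those inputs are excluded by Pre_ (on admitted inputs the default branch is never the deciding one).
def collect_dimension_names_py (results : List (List (String × List (String × Int)))) : List String :=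
  pvOrdered.filter (fun name =>
    results.any (fun result =>
      ((PySem.Dict.mk result).getD "scores" []).any (fun p => p.1 == name)))

-- ===== PORT B =====
-- B's loop: for result in results: if all names present: break; present.update(result["scores"])
def pvCollectGo (present : PySem.Set String) :
    List (List (String × List (String × Int))) → PySem.Set String
  | [] => present
  | result :: rest =>
      if pvOrdered.all (fun name => PySem.Set.contains present name) then present
      else pvCollectGo
        (PySem.Set.update present
          (((PySem.Dict.mk result).getD "scores" []).map (·.1))) rest

def collect_dimension_names_py_alt (results : List (List (String × List (String × Int)))) : List String :=
  pvOrdered.filter (fun name => PySem.Set.contains (pvCollectGo PySem.Set.empty results) name)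

-- ===== PRECONDITION & SPEC =====
-- Pre_ excludes exactly the inputs where the Python A raises KeyError: some result lacks the
-- "scores" key and not all eight dimension names are already covered by the results before it.
def Pre_collect_dimension_names_py (results : List (List (String × List (String × Int)))) : Prop :=
  ∀ i : Nat, (h : i < results.length) →
    (PySem.Dict.mk results[i]).contains "scores" = false →
    ∀ name ∈ pvOrdered,
      (results.take i).any (fun result =>
        ((PySem.Dict.mk result).getD "scores" []).any (fun p => p.1 == name)) = true
instance (results : List (List (String × List (String × Int)))) : Decidable (Pre_collect_dimension_names_py results) := by unfold Pre_collect_dimension_names_py; infer_instance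

def pvWitness_collect_dimension_names_py : (List (List (String × List (String × Int)))) :=
  [[("scores", [("route", 3), ("safety", 2)])], [("scores", [])]]

def Spec_collect_dimension_names_py (results : List (List (String × List (String × Int)))) (out : List String) : Prop := out = collect_dimension_names_py_alt results
instance (results : List (List (String × List (String × Int)))) (out : List String) : Decidable (Spec_collect_dimension_names_py results out) := by unfold Spec_collect_dimension_names_py; infer_instance

-- ===== CLAIM (what is proved, stated in full; the proofs are below) =====
def Claim_equal_collect_dimension_names_py : Prop := ∀ (results : List (List (String × List (String × Int)))), Dom_collect_dimension_names_py results → Pre_collect_dimension_names_py results → Spec_collect_dimension_names_py results (collect_dimension_names_py results)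

-- ===== LEMMAS AND PROOFS =====

-- membership in Set.update is membership in either part
theorem pv_mem_update {x : String} (s : PySem.Set String) (l : List String) :
    x ∈ PySem.Set.update s l ↔ x ∈ s ∨ x ∈ l := by
  induction l generalizing s with
  | nil => simp [PySem.Set.update]
  | cons a t ih =>
      rw [show PySem.Set.update s (a :: t) = PySem.Set.update (PySem.Set.add s a) t from rfl,
          ih, PySem.Set.mem_add]
      simp only [List.mem_cons]
      tauto

-- the accumulated set answers, on ordered names, exactly A's per-name scan
theorem pv_keys_mem (sc : List (String × Int)) (n : String) :
    n ∈ sc.map (fun p => p.1) ↔ (sc.any fun p => p.1 == n) = true := by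
  simp only [List.any_eq_true, List.mem_map, beq_iff_eq]

theorem pv_go_contains (rs : List (List (String × List (String × Int)))) :
    ∀ (P : PySem.Set String), ∀ name ∈ pvOrdered,
      PySem.Set.contains (pvCollectGo P rs) name =
        (PySem.Set.contains P name ||
          rs.any (fun result =>
            ((PySem.Dict.mk result).getD "scores" []).any (fun p => p.1 == name))) := by
  induction rs with
  | nil => simp [pvCollectGo]
  | cons r rest ih =>
      intro P name hn
      by_cases hbrk : (pvOrdered.all fun n => PySem.Set.contains P n) = true
      · have hP : PySem.Set.contains P name = true := List.all_eq_true.mp hbrk name hn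
        have hgo : pvCollectGo P (r :: rest) = P := by
          simp only [pvCollectGo]; rw [if_pos hbrk]
        rw [hgo, hP]; simp
      · have hgo : pvCollectGo P (r :: rest) =
            pvCollectGo (PySem.Set.update P
              (((PySem.Dict.mk r).getD "scores" []).map (fun p => p.1))) rest := by
          simp only [pvCollectGo]; rw [if_neg hbrk]
        rw [hgo, ih _ name hn, Bool.eq_iff_iff]
        simp only [Bool.or_eq_true, PySem.Set.contains, List.contains_eq_mem,
          decide_eq_true_eq, pv_mem_update, List.any_cons, pv_keys_mem]
        tauto

-- ===== VERDICT (by name: the statement is the Claim_ definition above) =====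
theorem collect_dimension_names_py_spec : Claim_equal_collect_dimension_names_py := by
  intro results _hdom _hpre
  unfold Spec_collect_dimension_names_py collect_dimension_names_py collect_dimension_names_py_alt
  refine List.filter_congr ?_
  intro name hn
  rw [pv_go_contains results PySem.Set.empty name hn]
  simp [PySem.Set.empty, PySem.Set.contains]
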